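-- pv_equiv track=rewrite | github.com/mafshin/problem-solving-sample | problems/P039/P039.py | P039
-- ===== SOURCE A (Python) =====
-- def P039(number_1, list_1):
--     m = []
--     for w in range(len(list_1)):
--         for x in list_1[w]:
--             I = 0
--             for W in range(len(list_1)):
--                 for X in set(list_1[W]):
--                     if x == X:
--                         I += 1
--                         if I == number_1:
--                             u = list(map(lambda f: f[0] , m))
--                             if x not in u:
--                                 m.append((x , I))
--     m.sort(key=lambda p: -1 * p[1])
--     m.reverse()
--     ouput = []
--     for OUPUT in m:
--         ouput.append(OUPUT[0])
--     return " ".join(ouput)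
-- ===== SOURCE B (Python) =====
-- def P039(number_1, list_1):
--     if number_1 < 1:
--         return ""
--     count = {}
--     for lst in list_1:
--         for x in set(lst):
--             count[x] = count.get(x, 0) + 1
--     order = []
--     seen = set()
--     for lst in list_1:
--         for x in lst:
--             if x not in seen:
--                 seen.add(x)
--                 if count[x] >= number_1:
--                     order.append(x)
--     order.reverse()
--     return " ".join(order)
-- ===== Notes on version B (the rewrite author's own statement) =====
-- stated objective: faster
-- what changed: Replaces A's per-occurrence recount (a quadruple nested loop that re-scans every list for every element occurrence, plus a membership scan of m and a final sort) by two linear passes: one pass builds a dict counting in how many lists each value occurs, a second pass collects values with count >= number_1 in first-appearance order gated by a seen-set, then reverses and joins.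
import Mathlib
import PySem

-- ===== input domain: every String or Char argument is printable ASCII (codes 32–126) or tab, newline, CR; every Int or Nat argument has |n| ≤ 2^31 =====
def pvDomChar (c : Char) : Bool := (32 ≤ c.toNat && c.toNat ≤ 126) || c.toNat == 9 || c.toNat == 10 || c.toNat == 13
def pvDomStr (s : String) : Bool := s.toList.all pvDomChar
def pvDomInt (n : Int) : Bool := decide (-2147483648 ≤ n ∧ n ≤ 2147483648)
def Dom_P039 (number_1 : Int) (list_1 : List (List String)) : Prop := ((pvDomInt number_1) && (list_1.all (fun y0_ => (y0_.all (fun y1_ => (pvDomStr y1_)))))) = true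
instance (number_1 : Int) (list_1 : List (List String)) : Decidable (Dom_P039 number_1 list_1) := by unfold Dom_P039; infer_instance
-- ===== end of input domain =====

-- B replaces A's per-occurrence recount (quadruple nested loop + membership scan + final sort) by
-- two linear passes: a dict counting in how many lists each value occurs, then a seen-gated
-- collection in first-appearance order, reversed and joined (objective: faster).

-- ===== PORT A =====
-- literal transliteration of A; Python's `for X in set(...)` is ported in PySem.Set order
-- (first occurrences) — A's result does not depend on that iteration order
def P039 (number_1 : Int) (list_1 : List (List String)) : String :=
  let m : List (String × Int) :=
    (PySem.List.pyRange 0 (list_1.length : Int) 1).foldl (fun m w =>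
      (PySem.List.pyGetD list_1 w []).foldl (fun m x =>
        ((PySem.List.pyRange 0 (list_1.length : Int) 1).foldl (fun (q : Int × List (String × Int)) W =>
          (PySem.Set.ofList (PySem.List.pyGetD list_1 W [])).foldl (fun (q : Int × List (String × Int)) X =>
            if x = X then
              let I := q.1 + 1
              if I = number_1 then
                let u := q.2.map (fun f => f.1)
                if x ∉ u then (I, q.2 ++ [(x, I)]) else (I, q.2)
              else (I, q.2)
            else q) q) (0, m)).2) m) []
  let m := PySem.List.sorted m (fun p => -1 * p.2) false
  let m := m.reverse
  let ouput := m.foldl (fun (o : List String) p => o ++ [p.1]) []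
  PySem.Str.join " " ouput

-- ===== PORT B =====
-- count[x] in Source B can never miss (x was counted); its lookup is ported as getD
def P039_alt (number_1 : Int) (list_1 : List (List String)) : String :=
  if number_1 < 1 then "" else
  let count : PySem.Dict String Int :=
    list_1.foldl (fun d lst =>
      (PySem.Set.ofList lst).foldl (fun d x => d.insert x (d.getD x 0 + 1)) d) PySem.Dict.empty
  let p : List String × PySem.Set String :=
    list_1.foldl (fun p lst =>
      lst.foldl (fun (p : List String × PySem.Set String) x =>
        if PySem.Set.contains p.2 x then p
        else ((if count.getD x 0 ≥ number_1 then p.1 ++ [x] else p.1), PySem.Set.add p.2 x)) p)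
      ([], PySem.Set.empty)
  let order := p.1.reverse
  PySem.Str.join " " order

-- ===== PRECONDITION & SPEC =====
def Spec_P039 (number_1 : Int) (list_1 : List (List String)) (out : String) : Prop := out = P039_alt number_1 list_1
instance (number_1 : Int) (list_1 : List (List String)) (out : String) : Decidable (Spec_P039 number_1 list_1 out) := by unfold Spec_P039; infer_instance

-- ===== CLAIM (what is proved, stated in full; the proofs are below) =====
def Claim_equal_P039 : Prop := ∀ (number_1 : Int) (list_1 : List (List String)), Dom_P039 number_1 list_1 → Spec_P039 number_1 list_1 (P039 number_1 list_1)

-- ===== LEMMAS AND PROOFS =====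

-- number of lists of `ls` that contain `x` (each list counted once)
def cntL (ls : List (List String)) (x : String) : Int := (ls.countP (fun l => decide (x ∈ l)) : Int)

lemma cntL_cons (l : List String) (ls : List (List String)) (x : String) :
    cntL (l :: ls) x = (if x ∈ l then 1 else 0) + cntL ls x := by
  unfold cntL
  rw [List.countP_cons]
  by_cases h : x ∈ l
  · simp [h]
    omega
  · simp [h]

lemma cntL_nonneg (ls : List (List String)) (x : String) : 0 ≤ cntL ls x := by
  unfold cntL; positivity

-- a fold that acts only on elements equal to x, over a nodup list: applies F once iff x is present
lemma foldl_match {α : Type} (F : α → α) (x : String) :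
    ∀ (s : List String), s.Nodup → ∀ (q : α),
      s.foldl (fun q X => if x = X then F q else q) q = if x ∈ s then F q else q := by
  intro s
  induction s with
  | nil => intro _ q; simp
  | cons y t ih =>
    intro hnd q
    rcases List.nodup_cons.mp hnd with ⟨hy, ht⟩
    by_cases hxy : x = y
    · subst hxy
      have hxt : x ∉ t := hy
      simp only [List.foldl_cons, ih ht, if_neg hxt, List.mem_cons, true_or, if_pos]
    · simp only [List.foldl_cons, if_neg hxy, ih ht, List.mem_cons]
      simp [hxy]

-- flatten a nested foldl over a list of lists
lemma foldl_foldl_flatMap {α : Type} (f : α → String → α) :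
    ∀ (ls : List (List String)) (init : α),
      ls.foldl (fun a l => l.foldl f a) init = (ls.flatMap id).foldl f init := by
  intro ls
  induction ls with
  | nil => intro init; simp
  | cons l t ih => intro init; simp [List.foldl_append, ih]

-- ordered dedup grows by one element exactly on a fresh value
lemma ofList_append_singleton (p : List String) (x : String) :
    PySem.Set.ofList (p ++ [x])
      = if x ∈ p then PySem.Set.ofList p else PySem.Set.ofList p ++ [x] := by
  rw [PySem.Set.ofList_eq_foldl, List.foldl_append]
  rw [← PySem.Set.ofList_eq_foldl]
  simp only [List.foldl_cons, List.foldl_nil, PySem.Set.add, PySem.Set.contains]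
  by_cases h : x ∈ p <;> simp [h, PySem.Set.mem_ofList]

-- A's inner double loop over whole lists: starting from (c, m) it adds the number of lists
-- containing x to c, and appends (x, number_1) exactly when the count first reaches number_1
-- while x is fresh in m
lemma A_count (n : Int) (x : String) :
    ∀ (ls : List (List String)) (c : Int) (m : List (String × Int)),
      ls.foldl (fun (q : Int × List (String × Int)) l =>
          if x ∈ l then
            (let I := q.1 + 1
             if I = n then
               let u := q.2.map (fun f => f.1)
               if x ∉ u then (I, q.2 ++ [(x, I)]) else (I, q.2)
             else (I, q.2))
          else q) (c, m)
      = (c + cntL ls x,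
         if c < n ∧ n ≤ c + cntL ls x ∧ x ∉ m.map (fun f => f.1) then m ++ [(x, n)] else m) := by
  intro ls
  induction ls with
  | nil =>
    intro c m
    simp only [List.foldl_nil, cntL, List.countP_nil, Nat.cast_zero, add_zero]
    rw [if_neg (by rintro ⟨h1, h2, _⟩; omega)]
  | cons l t ih =>
    intro c m
    rw [List.foldl_cons, cntL_cons]
    by_cases hl : x ∈ l
    · rw [if_pos hl]
      simp only []
      by_cases htr : c + 1 = n
      · rw [if_pos htr]
        by_cases hm : x ∉ m.map (fun f => f.1)
        · rw [if_pos hm, ih]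
          have h1 : ¬(c + 1 < n ∧ n ≤ c + 1 + cntL t x ∧ x ∉ (m ++ [(x, c + 1)]).map (fun f => f.1)) := by
            rintro ⟨hlt, _, _⟩; omega
          have hc : c < n ∧ n ≤ c + ((if x ∈ l then (1:Int) else 0) + cntL t x) ∧ x ∉ m.map (fun f => f.1) := by
            refine ⟨by omega, ?_, hm⟩
            have := cntL_nonneg t x
            rw [if_pos hl]; omega
          rw [if_neg h1, if_pos hc, htr]
          simp only [if_pos hl, Prod.mk.injEq]
          exact ⟨by omega, by trivial⟩
        · rw [if_neg hm, ih]
          have hxm : x ∈ m.map (fun f => f.1) := not_not.mp hm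
          have h1 : ¬(c + 1 < n ∧ n ≤ c + 1 + cntL t x ∧ x ∉ m.map (fun f => f.1)) := by
            rintro ⟨hlt, _, _⟩; omega
          have h2 : ¬(c < n ∧ n ≤ c + ((if x ∈ l then (1:Int) else 0) + cntL t x) ∧ x ∉ m.map (fun f => f.1)) := by
            rintro ⟨_, _, hh⟩; exact hh hxm
          rw [if_neg h1, if_neg h2]
          simp only [if_pos hl, Prod.mk.injEq]
          exact ⟨by omega, by trivial⟩
      · rw [if_neg htr, ih]
        have harith : (c + 1 < n ∧ n ≤ c + 1 + cntL t x ∧ x ∉ m.map (fun f => f.1))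
            ↔ (c < n ∧ n ≤ c + ((if x ∈ l then (1:Int) else 0) + cntL t x) ∧ x ∉ m.map (fun f => f.1)) := by
          rw [if_pos hl]
          constructor
          · rintro ⟨h1, h2, h3⟩; exact ⟨by omega, by omega, h3⟩
          · rintro ⟨h1, h2, h3⟩; exact ⟨by omega, by omega, h3⟩
        rw [Prod.mk.injEq]
        refine ⟨by rw [if_pos hl]; ring, ?_⟩
        by_cases hc : c + 1 < n ∧ n ≤ c + 1 + cntL t x ∧ x ∉ m.map (fun f => f.1)
        · rw [if_pos hc, if_pos (harith.mp hc)]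
        · rw [if_neg hc, if_neg (fun hh => hc (harith.mpr hh))]
    · rw [if_neg hl, ih, if_neg hl, zero_add]

-- A's inner loop exactly as it appears in the port (range-indexed), in closed form
lemma A_inner_full (n : Int) (ls : List (List String)) (x : String) (m : List (String × Int)) :
    ((PySem.List.pyRange 0 (ls.length : Int) 1).foldl (fun (q : Int × List (String × Int)) W =>
        (PySem.Set.ofList (PySem.List.pyGetD ls W [])).foldl (fun (q : Int × List (String × Int)) X =>
          if x = X then
            let I := q.1 + 1
            if I = n then
              let u := q.2.map (fun f => f.1)
              if x ∉ u then (I, q.2 ++ [(x, I)]) else (I, q.2)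
            else (I, q.2)
          else q) q) (0, m)).2
    = if 0 < n ∧ n ≤ cntL ls x ∧ x ∉ m.map (fun f => f.1) then m ++ [(x, n)] else m := by
  rw [PySem.List.foldl_pyRange_zero_pyGetD' ls []
    (fun (q : Int × List (String × Int)) (l : List String) =>
      (PySem.Set.ofList l).foldl (fun (q : Int × List (String × Int)) X =>
        if x = X then
          let I := q.1 + 1
          if I = n then
            let u := q.2.map (fun f => f.1)
            if x ∉ u then (I, q.2 ++ [(x, I)]) else (I, q.2)
          else (I, q.2)
        else q) q) (0, m)]
  rw [PySem.List.foldl_congr_mem ls _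
    (fun (q : Int × List (String × Int)) l =>
      if x ∈ l then
        (let I := q.1 + 1
         if I = n then
           let u := q.2.map (fun f => f.1)
           if x ∉ u then (I, q.2 ++ [(x, I)]) else (I, q.2)
         else (I, q.2))
      else q) (0, m)
    (fun q l _ => by
      rw [foldl_match (fun (q : Int × List (String × Int)) =>
        (let I := q.1 + 1
         if I = n then
           let u := q.2.map (fun f => f.1)
           if x ∉ u then (I, q.2 ++ [(x, I)]) else (I, q.2)
         else (I, q.2))) x (PySem.Set.ofList l) (PySem.Set.nodup_ofList l) q]
      simp only [PySem.Set.mem_ofList])]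
  rw [A_count]
  simp only [zero_add]

-- A's outer double loop maintains: m is the cond-filtered ordered dedup of the scanned prefix
lemma A_outer (n : Int) (cnt : String → Int) :
    ∀ (zs p : List String),
      zs.foldl (fun (m : List (String × Int)) x =>
          if 0 < n ∧ n ≤ cnt x ∧ x ∉ m.map (fun f => f.1) then m ++ [(x, n)] else m)
        (((PySem.List.dedup p).filter (fun y => decide (0 < n ∧ n ≤ cnt y))).map (fun y => (y, n)))
      = ((PySem.List.dedup (p ++ zs)).filter (fun y => decide (0 < n ∧ n ≤ cnt y))).map (fun y => (y, n)) := by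
  intro zs
  induction zs with
  | nil => intro p; simp
  | cons x t ih =>
    intro p
    rw [List.foldl_cons]
    have hfst : (((PySem.List.dedup p).filter (fun y => decide (0 < n ∧ n ≤ cnt y))).map (fun y => (y, n))).map (fun f => f.1)
        = (PySem.List.dedup p).filter (fun y => decide (0 < n ∧ n ≤ cnt y)) := by
      rw [List.map_map, show ((fun f : String × Int => f.1) ∘ fun y => (y, n)) = id from rfl, List.map_id]
    have hded : PySem.List.dedup (p ++ [x]) = if x ∈ p then PySem.List.dedup p else PySem.List.dedup p ++ [x] := by
      simp only [PySem.List.dedup_eq_ofList]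
      exact ofList_append_singleton p x
    have hstep :
        (if 0 < n ∧ n ≤ cnt x ∧ x ∉ (((PySem.List.dedup p).filter (fun y => decide (0 < n ∧ n ≤ cnt y))).map (fun y => (y, n))).map (fun f => f.1)
          then (((PySem.List.dedup p).filter (fun y => decide (0 < n ∧ n ≤ cnt y))).map (fun y => (y, n))) ++ [(x, n)]
          else (((PySem.List.dedup p).filter (fun y => decide (0 < n ∧ n ≤ cnt y))).map (fun y => (y, n))))
        = ((PySem.List.dedup (p ++ [x])).filter (fun y => decide (0 < n ∧ n ≤ cnt y))).map (fun y => (y, n)) := by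
      rw [hfst]
      by_cases hcond : 0 < n ∧ n ≤ cnt x
      · by_cases hp : x ∈ p
        · have hxd : x ∈ (PySem.List.dedup p).filter (fun y => decide (0 < n ∧ n ≤ cnt y)) := by
            rw [List.mem_filter]
            exact ⟨by rw [PySem.List.dedup_eq_ofList, PySem.Set.mem_ofList]; exact hp, by simpa using hcond⟩
          rw [if_neg (by rintro ⟨_, _, h⟩; exact h hxd), hded, if_pos hp]
        · have hxd : x ∉ (PySem.List.dedup p).filter (fun y => decide (0 < n ∧ n ≤ cnt y)) := by
            rw [List.mem_filter]
            rintro ⟨hx, _⟩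
            rw [PySem.List.dedup_eq_ofList, PySem.Set.mem_ofList] at hx
            exact hp hx
          rw [if_pos ⟨hcond.1, hcond.2, hxd⟩, hded, if_neg hp]
          rw [List.filter_append, List.map_append]
          congr 1
          simp [hcond.1, hcond.2]
      · rw [if_neg (by rintro ⟨h1, h2, _⟩; exact hcond ⟨h1, h2⟩), hded]
        by_cases hp : x ∈ p
        · rw [if_pos hp]
        · rw [if_neg hp, List.filter_append]
          have h1 : List.filter (fun y => decide (0 < n ∧ n ≤ cnt y)) [x] = [] := by
            simp only [List.filter_cons, List.filter_nil]
            rw [if_neg (by simpa using hcond)]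
          rw [h1, List.append_nil]
    rw [hstep, ih]
    simp

-- B's counting pass computes cntL
lemma B_count (x : String) :
    ∀ (ls : List (List String)) (d : PySem.Dict String Int),
      (ls.foldl (fun d lst =>
          (PySem.Set.ofList lst).foldl (fun d x => d.insert x (d.getD x 0 + 1)) d) d).getD x 0
      = d.getD x 0 + cntL ls x := by
  intro ls
  induction ls with
  | nil => intro d; simp [cntL]
  | cons l t ih =>
    intro d
    rw [List.foldl_cons, ih, PySem.Dict.getD_foldl_insert_add_one, cntL_cons]
    have hcount : (List.count x (PySem.Set.ofList l) : Int) = if x ∈ l then 1 else 0 := by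
      by_cases h : x ∈ l
      · rw [if_pos h]
        have hm : x ∈ PySem.Set.ofList l := (PySem.Set.mem_ofList l x).mpr h
        rw [List.count_eq_one_of_mem (PySem.Set.nodup_ofList l) hm]
        rfl
      · rw [if_neg h]
        have hm : x ∉ PySem.Set.ofList l := fun hc => h ((PySem.Set.mem_ofList l x).mp hc)
        rw [List.count_eq_zero_of_not_mem hm]
        rfl
    rw [hcount]
    ring

-- B's collection pass maintains: order is the count-filtered ordered dedup, seen the set, of the prefix
lemma B_outer (n : Int) (cnt : String → Int) :
    ∀ (zs p : List String),
      zs.foldl (fun (q : List String × PySem.Set String) x =>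
          if PySem.Set.contains q.2 x then q
          else ((if cnt x ≥ n then q.1 ++ [x] else q.1), PySem.Set.add q.2 x))
        ((PySem.List.dedup p).filter (fun y => decide (cnt y ≥ n)), PySem.Set.ofList p)
      = ((PySem.List.dedup (p ++ zs)).filter (fun y => decide (cnt y ≥ n)), PySem.Set.ofList (p ++ zs)) := by
  intro zs
  induction zs with
  | nil => intro p; simp
  | cons x t ih =>
    intro p
    rw [List.foldl_cons]
    have hc : PySem.Set.contains (PySem.Set.ofList p) x = decide (x ∈ p) := by
      simp [PySem.Set.contains, PySem.Set.mem_ofList]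
    have hded : PySem.List.dedup (p ++ [x]) = if x ∈ p then PySem.List.dedup p else PySem.List.dedup p ++ [x] := by
      simp only [PySem.List.dedup_eq_ofList]
      exact ofList_append_singleton p x
    have hadd : PySem.Set.add (PySem.Set.ofList p) x = PySem.Set.ofList (p ++ [x]) := by
      rw [ofList_append_singleton]
      simp only [PySem.Set.add, hc]
      by_cases hp : x ∈ p <;> simp [hp]
    have hstep :
        (if PySem.Set.contains (PySem.Set.ofList p) x then
            ((PySem.List.dedup p).filter (fun y => decide (cnt y ≥ n)), PySem.Set.ofList p)
          else ((if cnt x ≥ n then (PySem.List.dedup p).filter (fun y => decide (cnt y ≥ n)) ++ [x]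
                 else (PySem.List.dedup p).filter (fun y => decide (cnt y ≥ n))),
                PySem.Set.add (PySem.Set.ofList p) x))
        = ((PySem.List.dedup (p ++ [x])).filter (fun y => decide (cnt y ≥ n)), PySem.Set.ofList (p ++ [x])) := by
      rw [hc]
      by_cases hp : x ∈ p
      · rw [if_pos (by simpa using hp), hded, if_pos hp]
        rw [ofList_append_singleton, if_pos hp]
      · rw [if_neg (by simpa using hp), hded, if_neg hp, hadd]
        rw [List.filter_append]
        congr 2
        by_cases hcnt : cnt x ≥ n
        · rw [if_pos hcnt]
          simp [hcnt]
        · rw [if_neg hcnt]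
          simp only [List.filter_cons, List.filter_nil]
          rw [if_neg (by simpa using hcnt), List.append_nil]
    rw [hstep, ih]
    simp

theorem P039_eq_alt (n : Int) (ls : List (List String)) : P039 n ls = P039_alt n ls := by
  -- A in closed form
  have hA : P039 n ls = PySem.Str.join " "
      (((PySem.List.dedup (ls.flatMap id)).filter (fun y => decide (0 < n ∧ n ≤ cntL ls y))).reverse) := by
    simp only [P039]
    rw [PySem.List.foldl_pyRange_zero_pyGetD' ls []
      (fun (m : List (String × Int)) (l : List String) => l.foldl (fun m x =>
        ((PySem.List.pyRange 0 (ls.length : Int) 1).foldl (fun (q : Int × List (String × Int)) W =>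
          (PySem.Set.ofList (PySem.List.pyGetD ls W [])).foldl (fun (q : Int × List (String × Int)) X =>
            if x = X then
              let I := q.1 + 1
              if I = n then
                let u := q.2.map (fun f => f.1)
                if x ∉ u then (I, q.2 ++ [(x, I)]) else (I, q.2)
              else (I, q.2)
            else q) q) (0, m)).2) m) []]
    rw [foldl_foldl_flatMap _ ls []]
    rw [PySem.List.foldl_congr_mem (ls.flatMap id) _
      (fun (m : List (String × Int)) (x : String) =>
        if 0 < n ∧ n ≤ cntL ls x ∧ x ∉ m.map (fun f => f.1) then m ++ [(x, n)] else m) []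
      (fun m x _ => A_inner_full n ls x m)]
    have hO := A_outer n (cntL ls) (ls.flatMap id) []
    rw [show (((PySem.List.dedup ([] : List String)).filter (fun y => decide (0 < n ∧ n ≤ cntL ls y))).map (fun y => (y, n))) = ([] : List (String × Int)) from rfl,
        List.nil_append] at hO
    rw [hO]
    have hpw : (((PySem.List.dedup (ls.flatMap id)).filter (fun y => decide (0 < n ∧ n ≤ cntL ls y))).map (fun y => (y, n))).Pairwise
        (fun a b => (fun p : String × Int => -1 * p.2) a ≤ (fun p : String × Int => -1 * p.2) b) := by
      rw [List.pairwise_map]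
      exact List.pairwise_of_forall (fun a b => le_refl _)
    rw [PySem.List.sorted_eq_self_of_pairwise _ _ hpw]
    rw [PySem.List.foldl_append_singleton_eq_map (fun p : String × Int => p.1)]
    simp [List.map_reverse, List.map_map,
      show ((fun p : String × Int => p.1) ∘ fun y => (y, n)) = id from rfl]
  -- B in closed form
  have hB : P039_alt n ls = if n < 1 then "" else PySem.Str.join " "
      (((PySem.List.dedup (ls.flatMap id)).filter (fun y => decide (cntL ls y ≥ n))).reverse) := by
    by_cases hn : n < 1
    · simp [P039_alt, hn]
    · simp only [P039_alt, if_neg hn]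
      simp only [B_count, PySem.Dict.getD_empty, zero_add]
      rw [foldl_foldl_flatMap _ ls ([], PySem.Set.empty)]
      have hO := B_outer n (cntL ls) (ls.flatMap id) []
      rw [show (((PySem.List.dedup ([] : List String)).filter (fun y => decide (cntL ls y ≥ n)), PySem.Set.ofList ([] : List String)) : List String × PySem.Set String)
            = (([] : List String), (PySem.Set.empty : PySem.Set String)) from rfl,
          List.nil_append] at hO
      rw [hO]
  rw [hA, hB]
  by_cases hn : n < 1
  · rw [if_pos hn]
    have hnil : (PySem.List.dedup (ls.flatMap id)).filter (fun y => decide (0 < n ∧ n ≤ cntL ls y)) = [] := by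
      rw [List.filter_eq_nil_iff]
      intro a _
      simp only [decide_eq_true_eq]
      rintro ⟨h1, _⟩
      omega
    rw [hnil]
    rfl
  · rw [if_neg hn]
    congr 2
    apply List.filter_congr
    intro y _
    simp only [decide_eq_decide, ge_iff_le]
    constructor
    · rintro ⟨_, h⟩; exact h
    · intro h; exact ⟨by omega, h⟩

-- ===== VERDICT (by name: the statement is the Claim_ definition above) =====
theorem P039_spec : Claim_equal_P039 := by
  intro n ls _
  unfold Spec_P039
  exact P039_eq_alt n ls
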